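-- pv_equiv track=rewrite | github.com/EdgarAlvarez-ROL/MIA_PR2 | BackEnd/mount.py | comando
-- ===== SOURCE A (Python) =====
-- def comando(text):
--     tkn = ""
--     terminar = False
--     for c in text:
--         if terminar:
--             if c == ' ' or c == '-':
--                 break
--             tkn += c
--         elif c != ' ' and not terminar:
--             if c == '#':
--                 tkn = text
--                 break
--             else:
--                 tkn += c
--                 terminar = True
--     return tkn
-- ===== SOURCE B (Python) =====
-- def comando(text):
--     s = text.lstrip(' ')
--     if not s:
--         return ''
--     if s[0] == '#':
--         return text
--     rest = s[1:]
--     for sep in (' ', '-'):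
--         rest = rest.split(sep, 1)[0]
--     return s[0] + rest
-- ===== Notes on version B (the rewrite author's own statement) =====
-- stated objective: idiomatic
-- what changed: Replaces A's stateful two-phase character loop (skip-spaces flag, accumulate, break) with lstrip plus slicing and split: the token is the first stripped character followed by the rest cut at the first space or dash, with the comment-marker check done once on the stripped head.
import Mathlib
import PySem

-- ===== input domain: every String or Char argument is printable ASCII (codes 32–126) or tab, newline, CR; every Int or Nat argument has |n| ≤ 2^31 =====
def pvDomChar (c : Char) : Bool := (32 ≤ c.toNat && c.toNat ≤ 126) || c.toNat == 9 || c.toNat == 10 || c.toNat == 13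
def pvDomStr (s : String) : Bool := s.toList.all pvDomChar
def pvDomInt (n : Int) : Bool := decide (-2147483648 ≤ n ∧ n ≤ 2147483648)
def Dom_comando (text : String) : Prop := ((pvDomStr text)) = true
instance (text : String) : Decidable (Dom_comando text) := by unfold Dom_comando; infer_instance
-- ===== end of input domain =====

-- B replaces A's stateful two-phase character loop by lstrip(' ') + slicing/split (idiomatic, no explicit loop).

-- ===== PORT A =====
-- the for-loop of A, state: tkn (accumulated chars) and terminar; '#' branch returns text itself
def comandoLoop (text : String) : List Char → List Char → Bool → String
  | [], tkn, _ => String.ofList tkn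
  | c :: cs, tkn, true =>
      if c = ' ' ∨ c = '-' then String.ofList tkn
      else comandoLoop text cs (tkn ++ [c]) true
  | c :: cs, tkn, false =>
      if c ≠ ' ' then
        (if c = '#' then text else comandoLoop text cs (tkn ++ [c]) true)
      else comandoLoop text cs tkn false

def comando (text : String) : String := comandoLoop text text.toList [] false

-- ===== PORT B =====
-- s = text.lstrip(' '); '' → ''; '#…' → text; else s[0] + s[1:].split(' ',1)[0].split('-',1)[0]
-- (split(sep,1)[0] ported as takeWhile (· ≠ sep), its exact meaning)
def comando_alt (text : String) : String :=
  match text.toList.dropWhile (· = ' ') with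
  | [] => ""
  | c :: cs =>
      if c = '#' then text
      else String.ofList (c :: ((cs.takeWhile (· ≠ ' ')).takeWhile (· ≠ '-')))

-- ===== PRECONDITION & SPEC =====
def Spec_comando (text : String) (out : String) : Prop := out = comando_alt text
instance (text : String) (out : String) : Decidable (Spec_comando text out) := by unfold Spec_comando; infer_instance

-- ===== CLAIM (what is proved, stated in full; the proofs are below) =====
def Claim_equal_comando : Prop := ∀ (text : String), Dom_comando text → Spec_comando text (comando text)

-- ===== LEMMAS AND PROOFS =====

theorem takeWhile_takeWhile_pair (cs : List Char) :
    ((cs.takeWhile (· ≠ ' ')).takeWhile (· ≠ '-'))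
      = cs.takeWhile (fun c => ¬(c = ' ' ∨ c = '-')) := by
  induction cs with
  | nil => rfl
  | cons c cs ih =>
      by_cases h1 : c = ' '
      · simp [List.takeWhile, h1]
      · by_cases h2 : c = '-'
        · simp [List.takeWhile, h2]
        · simp [List.takeWhile, h1, h2]
          simpa using ih

theorem loop_true (text : String) (cs : List Char) (acc : List Char) :
    comandoLoop text cs acc true
      = String.ofList (acc ++ cs.takeWhile (fun c => ¬(c = ' ' ∨ c = '-'))) := by
  induction cs generalizing acc with
  | nil => simp [comandoLoop]
  | cons c cs ih =>
      by_cases h : c = ' ' ∨ c = '-'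
      · have hp : (!decide (c = ' ') && !decide (c = '-')) = false := by
          rcases h with h | h <;> simp [h]
        simp [comandoLoop, h, hp]
      · have hc1 : ¬ c = ' ' := fun hc => h (Or.inl hc)
        have hc2 : ¬ c = '-' := fun hc => h (Or.inr hc)
        simp [comandoLoop, ih, hc1, hc2]

theorem loop_false (text : String) (cs : List Char) :
    comandoLoop text cs [] false
      = match cs.dropWhile (· = ' ') with
        | [] => ""
        | c :: cs' =>
            if c = '#' then text
            else String.ofList (c :: cs'.takeWhile (fun c => ¬(c = ' ' ∨ c = '-'))) := by
  induction cs with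
  | nil => rfl
  | cons c cs ih =>
      by_cases h : c = ' '
      · simpa [comandoLoop, h, List.dropWhile] using ih
      · by_cases h2 : c = '#'
        · simp [comandoLoop, h2, List.dropWhile]
        · simp [comandoLoop, h, h2, List.dropWhile, loop_true]

-- ===== VERDICT (by name: the statement is the Claim_ definition above) =====
theorem comando_spec : Claim_equal_comando := by
  intro text _
  unfold Spec_comando comando comando_alt
  rw [loop_false]
  simp only [takeWhile_takeWhile_pair]
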